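-- pv_equiv track=rewrite | github.com/Anna8563/Aptamers_Model | new_scripts_5_10/utils.py | visualize_mismatch
-- ===== SOURCE A (Python) =====
-- def visualize_mismatch(target: str, predicted: str) -> str:
--     output_lines = ["TARGET:    " + target]
--     mismatch_line = "PREDICTED: "
--     pointer_line = "           "
--
--     max_len = max(len(target), len(predicted))
--     for i in range(max_len):
--         t_char = target[i] if i < len(target) else "-"
--         p_char = predicted[i] if i < len(predicted) else "+"
--
--         mismatch_line += p_char
--         if t_char != p_char:
--             pointer_line += "^"
--         else:
--             pointer_line += " "
--
--     output_lines.append(mismatch_line)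
--     output_lines.append(pointer_line)
--     return "\n".join(output_lines)
-- ===== SOURCE B (Python) =====
-- def visualize_mismatch(target: str, predicted: str) -> str:
--     # Region split: the aligned prefix is compared directly; the overhang of the
--     # longer string is compared against the other side's single fill character.
--     common = ''.join('^' if a != b else ' ' for a, b in zip(target, predicted))
--     if len(target) > len(predicted):
--         fill = '+' * (len(target) - len(predicted))
--         tail = ''.join(' ' if c == '+' else '^' for c in target[len(predicted):])
--     else:
--         fill = ''
--         tail = ''.join(' ' if c == '-' else '^' for c in predicted[len(target):])
--     return ('TARGET:    ' + target + '\n'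
--             'PREDICTED: ' + predicted + fill + '\n'
--             '           ' + common + tail)
-- ===== Notes on version B (the rewrite author's own statement) =====
-- stated objective: alternative
-- what changed: Replaces A's single index loop over range(max_len) with bounds-checked padded characters and per-char string += by a region split: the aligned prefix is compared via zip with no padding, and the overhang of the longer string is handled in a separate pass comparing each extra char against the literal fill character of the shorter side; lines are joined once.
import Mathlib
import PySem

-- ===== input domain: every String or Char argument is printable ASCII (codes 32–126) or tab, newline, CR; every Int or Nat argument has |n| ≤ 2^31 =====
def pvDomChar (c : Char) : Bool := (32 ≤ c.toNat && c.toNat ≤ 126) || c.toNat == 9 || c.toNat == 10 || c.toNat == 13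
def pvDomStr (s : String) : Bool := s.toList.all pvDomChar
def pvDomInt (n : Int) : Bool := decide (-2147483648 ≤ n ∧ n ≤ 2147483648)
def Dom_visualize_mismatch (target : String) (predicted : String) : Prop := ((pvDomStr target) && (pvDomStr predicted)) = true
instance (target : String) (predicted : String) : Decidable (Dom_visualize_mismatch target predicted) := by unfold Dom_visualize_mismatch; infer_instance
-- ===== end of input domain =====

-- B replaces A's index loop over range(max_len) (padded chars, per-step appends) by a
-- region split: zip-compare the aligned prefix, then a separate pass comparing the longer
-- string's overhang against the shorter side's fill char; same cost, different decomposition.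

-- ===== PORT A =====
-- Literal port of A's loop over range(max_len), appending one char to each of the
-- two accumulated lines per step (strings handled as List Char, joined at the end).
def visualize_mismatch (target : String) (predicted : String) : String :=
  let t := target.toList
  let p := predicted.toList
  let max_len := max t.length p.length
  let res := (List.range max_len).foldl (fun (s : List Char × List Char) i =>
    let t_char := if h : i < t.length then t[i] else '-'
    let p_char := if h : i < p.length then p[i] else '+'
    (s.1 ++ [p_char], s.2 ++ [if t_char ≠ p_char then '^' else ' ']))
    ("PREDICTED: ".toList, "           ".toList)
  String.mk ("TARGET:    ".toList ++ t ++ '\n' :: res.1 ++ '\n' :: res.2)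

-- ===== PORT B =====
def visualize_mismatch_alt (target : String) (predicted : String) : String :=
  let t := target.toList
  let p := predicted.toList
  let common := List.zipWith (fun a b => if a ≠ b then '^' else ' ') t p
  let fill := if t.length > p.length then List.replicate (t.length - p.length) '+' else []
  let tail := if t.length > p.length
    then (t.drop p.length).map (fun c => if c = '+' then ' ' else '^')
    else (p.drop t.length).map (fun c => if c = '-' then ' ' else '^')
  String.mk ("TARGET:    ".toList ++ t ++ '\n' ::
    ("PREDICTED: ".toList ++ p ++ fill) ++ '\n' :: ("           ".toList ++ common ++ tail))

-- ===== PRECONDITION & SPEC =====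
def Spec_visualize_mismatch (target : String) (predicted : String) (out : String) : Prop := out = visualize_mismatch_alt target predicted
instance (target : String) (predicted : String) (out : String) : Decidable (Spec_visualize_mismatch target predicted out) := by unfold Spec_visualize_mismatch; infer_instance

-- ===== CLAIM (what is proved, stated in full; the proofs are below) =====
def Claim_equal_visualize_mismatch : Prop := ∀ (target : String) (predicted : String), Dom_visualize_mismatch target predicted → Spec_visualize_mismatch target predicted (visualize_mismatch target predicted)

-- ===== LEMMAS AND PROOFS =====

-- A's fold over range n, appending one char per line per step, is the two maps.
lemma pvFoldPair (f g : Nat → Char) :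
    ∀ (n : Nat) (m0 p0 : List Char),
    (List.range n).foldl (fun (s : List Char × List Char) i => (s.1 ++ [f i], s.2 ++ [g i])) (m0, p0)
      = (m0 ++ (List.range n).map f, p0 ++ (List.range n).map g) := by
  intro n
  induction n with
  | zero => intro m0 p0; simp
  | succ k ih =>
    intro m0 p0
    rw [List.range_succ, List.foldl_append, List.map_append, ih]
    simp

-- A's mismatch-line chars over range n equal p padded with '+' to length n.
lemma pvMapPad (p : List Char) (n : Nat) (hln : p.length ≤ n) :
    (List.range n).map (fun i => if h : i < p.length then p[i] else '+')
      = p ++ List.replicate (n - p.length) '+' := by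
  apply List.ext_getElem
  · simp; omega
  · intro i h1 h2
    simp only [List.getElem_map, List.getElem_range]
    by_cases h : i < p.length
    · simp [h]
    · simp [List.getElem_append, h]

-- A's pointer chars, case target at least as long: prefix zip plus tail vs '+'.
lemma pvPtrLong (t p : List Char) (hpl : p.length ≤ t.length) :
    (List.range t.length).map (fun i =>
        if (if h : i < t.length then t[i] else '-') ≠ (if h : i < p.length then p[i] else '+')
        then '^' else ' ')
      = List.zipWith (fun a b => if a ≠ b then '^' else ' ') t p
          ++ (t.drop p.length).map (fun c => if c = '+' then ' ' else '^') := by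
  apply List.ext_getElem
  · simp; omega
  · intro i h1 h2
    have hi : i < t.length := by simpa using h1
    simp only [List.getElem_map, List.getElem_range, dif_pos hi]
    by_cases h : i < p.length
    · rw [List.getElem_append_left (by simpa [min_eq_right hpl] using h)]
      simp [h]
    · rw [List.getElem_append_right (by simpa [min_eq_right hpl] using h)]
      simp only [List.getElem_map, List.getElem_drop]
      rw [dif_neg h]
      have : p.length + (i - (List.zipWith (fun a b => if a ≠ b then '^' else ' ') t p).length) = i := by
        simp [min_eq_right hpl]; omega
      simp only [this]
      by_cases hc : t[i] = '+' <;> simp [hc]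

-- A's pointer chars, case predicted longer: prefix zip plus tail vs '-'.
lemma pvPtrShort (t p : List Char) (hpl : t.length ≤ p.length) :
    (List.range p.length).map (fun i =>
        if (if h : i < t.length then t[i] else '-') ≠ (if h : i < p.length then p[i] else '+')
        then '^' else ' ')
      = List.zipWith (fun a b => if a ≠ b then '^' else ' ') t p
          ++ (p.drop t.length).map (fun c => if c = '-' then ' ' else '^') := by
  apply List.ext_getElem
  · simp; omega
  · intro i h1 h2
    have hi : i < p.length := by simpa using h1
    simp only [List.getElem_map, List.getElem_range, dif_pos hi]
    by_cases h : i < t.length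
    · rw [List.getElem_append_left (by simpa [min_eq_left hpl] using h)]
      simp [h]
    · rw [List.getElem_append_right (by simpa [min_eq_left hpl] using h)]
      simp only [List.getElem_map, List.getElem_drop]
      rw [dif_neg h]
      have : t.length + (i - (List.zipWith (fun a b => if a ≠ b then '^' else ' ') t p).length) = i := by
        simp [min_eq_left hpl]; omega
      simp only [this]
      by_cases hc : p[i] = '-' <;> simp [hc] <;> exact fun e => hc e.symm

-- ===== VERDICT (by name: the statement is the Claim_ definition above) =====
theorem visualize_mismatch_spec : Claim_equal_visualize_mismatch := by
  intro target predicted _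
  unfold Spec_visualize_mismatch
  dsimp only [visualize_mismatch, visualize_mismatch_alt]
  set t := target.toList
  set p := predicted.toList
  rw [pvFoldPair (fun i => if h : i < p.length then p[i] else '+')
        (fun i => if (if h : i < t.length then t[i] else '-') ≠ (if h : i < p.length then p[i] else '+') then '^' else ' ')
        (max t.length p.length)]
  by_cases hlt : t.length > p.length
  · rw [max_eq_left (le_of_lt hlt)]
    rw [pvMapPad p t.length (le_of_lt hlt), pvPtrLong t p (le_of_lt hlt)]
    simp [hlt]
  · have h : t.length ≤ p.length := le_of_not_gt hlt
    rw [max_eq_right h]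
    rw [pvMapPad p p.length (le_refl _), pvPtrShort t p h]
    simp [hlt]
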